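-- pv_equiv track=rewrite | github.com/QuentinDuval/PythonExperiments | thorough/SplitArrayIntoFibonacciSequence.py | fib_split
-- ===== SOURCE A (Python) =====
-- def fib_split(a, b, seq):
--     i = 0
--     split = [a, b]
--     while i < len(seq):
--         a, b = b, a + b
--         if b > 2 ** 31 - 1:
--             return []
--
--         prefix = str(b)
--         for c in prefix:
--             if i == len(seq) or seq[i] != c:
--                 return []
--             i += 1
--         split.append(b)
--     return split
-- ===== SOURCE B (Python) =====
-- def fib_split(a, b, seq):
--     if not seq:
--         return [a, b]
--     c = a + b
--     if c > 2 ** 31 - 1: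
--         return []
--     s = str(c)
--     if not seq.startswith(s):
--         return []
--     rest = fib_split(b, c, seq[len(s):])
--     return [a] + rest if rest else []
-- ===== Notes on version B (the rewrite author's own statement) =====
-- stated objective: alternative
-- what changed: B replaces A's iterative while-loop with a running index and per-character inner matching by a recursion that strips the next term's decimal string off the front of seq (startswith + slice) and builds the result list front-to-back through the returns.
import Mathlib
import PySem

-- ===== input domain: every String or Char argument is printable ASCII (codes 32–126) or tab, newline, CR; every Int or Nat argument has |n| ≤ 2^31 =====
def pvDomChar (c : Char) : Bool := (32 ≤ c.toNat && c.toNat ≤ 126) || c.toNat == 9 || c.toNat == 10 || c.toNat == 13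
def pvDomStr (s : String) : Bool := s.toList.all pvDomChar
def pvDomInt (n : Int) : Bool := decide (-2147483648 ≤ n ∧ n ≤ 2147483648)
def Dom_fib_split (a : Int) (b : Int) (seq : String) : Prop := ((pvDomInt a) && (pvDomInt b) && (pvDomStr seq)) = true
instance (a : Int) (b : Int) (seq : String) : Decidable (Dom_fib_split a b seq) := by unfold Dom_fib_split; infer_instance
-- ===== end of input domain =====

-- B is a recursion that strips the next term's decimal string off the front of seq
-- (startswith + slice), building the result front-to-back, instead of A's indexed
-- while-loop with per-character matching; same cost, different decomposition.

-- str(n) is never the empty string (cited by both ports' termination proofs).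
theorem toDigitsCore_ne_nil (b : Nat) : ∀ (fuel n : Nat) (ds : List Char),
    ds ≠ [] → Nat.toDigitsCore b fuel n ds ≠ [] := by
  intro fuel
  induction fuel with
  | zero => intro n ds h; simpa [Nat.toDigitsCore] using h
  | succ fuel ih =>
    intro n ds _
    simp only [Nat.toDigitsCore]
    split
    · simp
    · exact ih _ _ (by simp)

theorem toChars_ne_nil (n : Int) : PySem.Int.toChars n ≠ [] := by
  unfold PySem.Int.toChars
  split
  · simp
  · show Nat.toDigits 10 n.toNat ≠ []
    unfold Nat.toDigits
    simp only [Nat.toDigitsCore]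
    split
    · simp
    · exact toDigitsCore_ne_nil 10 _ _ _ (by simp)

-- ===== PORT A =====
-- the inner `for c in prefix` loop of A: returns the advanced index i, or none for `return []`
def matchChars (seq : List Char) (i : Nat) : List Char → Option Nat
  | [] => some i
  | c :: rest =>
    if i = seq.length ∨ seq[i]? ≠ some c then none
    else matchChars seq (i + 1) rest

-- cited by loopA's termination proof
theorem matchChars_some_add (seq : List Char) : ∀ (p : List Char) (i j : Nat),
    matchChars seq i p = some j → j = i + p.length := by
  intro p
  induction p with
  | nil => intro i j h; simpa [matchChars] using h.symm
  | cons c rest ih =>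
    intro i j h
    simp only [matchChars] at h
    split at h
    · exact absurd h (by simp)
    · have := ih (i + 1) j h
      simp only [List.length_cons]
      omega

-- A's while loop, with the inner for loop as matchChars
def loopA (seq : List Char) (i : Nat) (a b : Int) (split : List Int) : List Int :=
  if _h : i < seq.length then
    if a + b > 2 ^ 31 - 1 then []
    else
      match _hm : matchChars seq i (PySem.Int.toChars (a + b)) with
      | none => []
      | some j => loopA seq j b (a + b) (split ++ [a + b])
  else split
termination_by seq.length - i
decreasing_by
  have h1 := matchChars_some_add seq _ _ _ _hm
  have h2 : 0 < (PySem.Int.toChars (a + b)).length :=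
    List.length_pos_of_ne_nil (toChars_ne_nil _)
  omega

def fib_split (a : Int) (b : Int) (seq : String) : List Int :=
  loopA seq.toList 0 a b [a, b]

-- ===== PORT B =====
-- B's recursion; `seq.startswith(s)` is the list-prefix test `<+:`, `seq[len(s):]` is
-- `List.drop s.length` (exact for a nonnegative slice start), `[a] + rest if rest else []`
-- is the match on rest.
def recB (a b : Int) (seq : List Char) : List Int :=
  if _hs : seq = [] then [a, b]
  else
    if a + b > 2 ^ 31 - 1 then []
    else
      let s := PySem.Int.toChars (a + b)
      if s <+: seq then
        match recB b (a + b) (seq.drop s.length) with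
        | [] => []
        | rest => a :: rest
      else []
termination_by seq.length
decreasing_by
  have h1 : 0 < (PySem.Int.toChars (a + b)).length :=
    List.length_pos_of_ne_nil (toChars_ne_nil _)
  have h2 : 0 < seq.length := List.length_pos_of_ne_nil _hs
  simp
  omega

def fib_split_alt (a : Int) (b : Int) (seq : String) : List Int :=
  recB a b seq.toList

-- ===== PRECONDITION & SPEC =====
def Spec_fib_split (a : Int) (b : Int) (seq : String) (out : List Int) : Prop := out = fib_split_alt a b seq
instance (a : Int) (b : Int) (seq : String) (out : List Int) : Decidable (Spec_fib_split a b seq out) := by unfold Spec_fib_split; infer_instance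

-- ===== CLAIM (what is proved, stated in full; the proofs are below) =====
def Claim_equal_fib_split : Prop := ∀ (a : Int) (b : Int) (seq : String), Dom_fib_split a b seq → Spec_fib_split a b seq (fib_split a b seq)

-- ===== LEMMAS AND PROOFS =====

-- A's inner loop succeeds exactly when the term's digits are the next chunk of seq
theorem matchChars_eq (seq : List Char) : ∀ (p : List Char) (i : Nat),
    matchChars seq i p = if p <+: seq.drop i then some (i + p.length) else none := by
  intro p
  induction p with
  | nil => intro i; simp [matchChars]
  | cons c rest ih =>
    intro i
    simp only [matchChars, ih (i + 1)]
    by_cases hlt : i < seq.length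
    · have hd : seq.drop i = seq[i] :: seq.drop (i + 1) := List.drop_eq_getElem_cons hlt
      have hget : seq[i]? = some seq[i] := List.getElem?_eq_getElem hlt
      rw [hd]
      simp only [hget, List.cons_prefix_cons, List.length_cons]
      split_ifs <;> simp_all <;> omega
    · have hnone : seq[i]? = none := List.getElem?_eq_none (by omega)
      have hd0 : seq.drop i = [] := List.drop_eq_nil_of_le (by omega)
      simp [hnone, hd0]

-- B's recursion returns [] or a list starting with its two arguments
theorem recB_shape : ∀ (n : Nat) (s : List Char) (a b : Int), s.length = n →
    recB a b s = [] ∨ ∃ t, recB a b s = a :: b :: t := by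
  intro n
  induction n using Nat.strong_induction_on with
  | _ n ih =>
    intro s a b hn
    rw [recB]
    by_cases hs : s = []
    · exact Or.inr ⟨[], by rw [dif_pos hs]⟩
    · rw [dif_neg hs]
      by_cases hov : a + b > 2 ^ 31 - 1
      · exact Or.inl (by rw [if_pos hov])
      · rw [if_neg hov]
        by_cases hp : PySem.Int.toChars (a + b) <+: s
        · rw [if_pos hp]
          have hd : 0 < (PySem.Int.toChars (a + b)).length :=
            List.length_pos_of_ne_nil (toChars_ne_nil _)
          have hslen : 0 < s.length := List.length_pos_of_ne_nil hs
          have := ih (s.drop (PySem.Int.toChars (a + b)).length).length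
            (by simp; omega) _ b (a + b) rfl
          rcases this with h0 | ⟨t, ht⟩
          · exact Or.inl (by rw [h0])
          · rw [ht]
            exact Or.inr ⟨(a + b) :: t, rfl⟩
        · exact Or.inl (by rw [if_neg hp])

-- the bridge: A's remaining loop from index i equals B's recursion on the rest of seq,
-- with A's accumulated `split` prepended in place of the recursion's first two elements
theorem main_loop (seq : List Char) : ∀ (n i : Nat) (a b : Int) (split : List Int),
    seq.length - i = n → i ≤ seq.length →
    loopA seq i a b split =
      (match recB a b (seq.drop i) with
       | [] => []
       | r => split ++ r.drop 2) := by
  intro n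
  induction n using Nat.strong_induction_on with
  | _ n ih =>
    intro i a b split hn hle
    rw [loopA.eq_def, recB]
    by_cases hlt : i < seq.length
    · have hdnil : ¬ seq.drop i = [] := by
        simp [List.drop_eq_nil_iff]; omega
      rw [dif_pos hlt, dif_neg hdnil]
      by_cases hov : a + b > 2 ^ 31 - 1
      · rw [if_pos hov, if_pos hov]
      · rw [if_neg hov, if_neg hov]
        rw [matchChars_eq]
        have hd : 0 < (PySem.Int.toChars (a + b)).length :=
          List.length_pos_of_ne_nil (toChars_ne_nil _)
        by_cases hp : PySem.Int.toChars (a + b) <+: seq.drop i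
        · rw [if_pos hp, if_pos hp]
          simp only []
          have hdrop : (seq.drop i).drop (PySem.Int.toChars (a + b)).length =
              seq.drop (i + (PySem.Int.toChars (a + b)).length) := by
            simp [List.drop_drop]
          rw [hdrop]
          have hplen : (PySem.Int.toChars (a + b)).length ≤ seq.length - i := by
            have := hp.length_le
            simp at this
            omega
          have hrec := ih (seq.length - (i + (PySem.Int.toChars (a + b)).length))
            (by omega) _ b (a + b) (split ++ [a + b]) rfl (by omega)
          rw [hrec]
          rcases recB_shape (seq.drop (i + (PySem.Int.toChars (a + b)).length)).length
              _ b (a + b) rfl with h0 | ⟨t, ht⟩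
          · rw [h0]
          · rw [ht]; simp
        · rw [if_neg hp, if_neg hp]
    · have hi : i = seq.length := by omega
      have hdnil : seq.drop i = [] := List.drop_eq_nil_of_le (by omega)
      rw [dif_neg hlt, dif_pos hdnil]
      simp

-- ===== VERDICT (by name: the statement is the Claim_ definition above) =====
theorem fib_split_spec : Claim_equal_fib_split := by
  intro a b seq _
  unfold Spec_fib_split fib_split fib_split_alt
  have h := main_loop seq.toList seq.toList.length 0 a b [a, b] (by simp) (by simp)
  simp only [List.drop_zero] at h
  rw [h]
  rcases recB_shape seq.toList.length seq.toList a b rfl with h0 | ⟨t, ht⟩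
  · rw [h0]
  · rw [ht]; simp
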